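-- pv_equiv track=rewrite | github.com/Ryzhtus/master-thesis | named_entity_recognition/reader_v2.py | __convert_to_document
-- ===== SOURCE A (Python) =====
-- def __convert_to_document(sentences: list, tags: list):
--     documents = []
--     documents_tags = []
--     document = []
--     document_tags = []
--
--     for sentence, tag in zip(sentences, tags):
--         if '-DOCSTART-' in sentence:
--             documents.append(document)
--             documents_tags.append(document_tags)
--             document = []
--             document_tags = []
--         else:
--             document.append(sentence)
--             document_tags.append(tag)
--
--     # append last document, because there is no '-DOCSTART-' or special end marker in text further
--     documents.append(document)
--     documents_tags.append(document_tags)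
--
--     return documents, documents_tags
-- ===== SOURCE B (Python) =====
-- def __convert_to_document(sentences: list, tags: list):
--     n = min(len(sentences), len(tags))
--     marks = [i for i in range(n) if '-DOCSTART-' in sentences[i]]
--     bounds = [-1] + marks + [n]
--     documents = [sentences[lo + 1:hi] for lo, hi in zip(bounds, bounds[1:])]
--     documents_tags = [tags[lo + 1:hi] for lo, hi in zip(bounds, bounds[1:])]
--     return documents, documents_tags
-- ===== Notes on version B (the rewrite author's own statement) =====
-- stated objective: alternative
-- what changed: B first locates the '-DOCSTART-' marker positions as an index list, then cuts both input lists into the documents between consecutive markers with slicing, instead of A's element-by-element scan with flush-and-reset accumulators and a final append.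
import Mathlib
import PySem

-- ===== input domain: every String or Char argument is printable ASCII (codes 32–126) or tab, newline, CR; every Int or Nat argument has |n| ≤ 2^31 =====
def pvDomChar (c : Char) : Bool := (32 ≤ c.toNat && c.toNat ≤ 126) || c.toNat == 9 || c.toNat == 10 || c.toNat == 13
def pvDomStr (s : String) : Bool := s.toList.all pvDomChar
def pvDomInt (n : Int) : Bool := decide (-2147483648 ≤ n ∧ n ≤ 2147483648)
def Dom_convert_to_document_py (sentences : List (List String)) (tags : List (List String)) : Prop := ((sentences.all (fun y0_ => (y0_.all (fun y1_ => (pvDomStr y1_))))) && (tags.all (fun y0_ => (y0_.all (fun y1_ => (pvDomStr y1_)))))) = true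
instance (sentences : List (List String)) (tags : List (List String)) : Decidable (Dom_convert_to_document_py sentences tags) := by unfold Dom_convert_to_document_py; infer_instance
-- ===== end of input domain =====

-- B locates the '-DOCSTART-' marker positions first and then cuts both lists into the
-- segments between consecutive markers by slicing, instead of A's element-by-element
-- scan with flush-and-reset accumulators; objective: alternative decomposition.

-- ===== PORT A =====
-- loop body of A: state (documents, documents_tags, document, document_tags)
def pvStepA (acc : List (List (List String)) × List (List (List String)) × List (List String) × List (List String))
    (st : List String × List String) :
    List (List (List String)) × List (List (List String)) × List (List String) × List (List String) :=
  if "-DOCSTART-" ∈ st.1 then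
    (acc.1 ++ [acc.2.2.1], acc.2.1 ++ [acc.2.2.2], [], [])
  else
    (acc.1, acc.2.1, acc.2.2.1 ++ [st.1], acc.2.2.2 ++ [st.2])

def convert_to_document_py (sentences : List (List String)) (tags : List (List String)) :
    List (List (List String)) × List (List (List String)) :=
  let r := (sentences.zip tags).foldl pvStepA ([], [], [], [])
  (r.1 ++ [r.2.2.1], r.2.1 ++ [r.2.2.2])

-- ===== PORT B =====
def convert_to_document_py_alt (sentences : List (List String)) (tags : List (List String)) :
    List (List (List String)) × List (List (List String)) :=
  let n : Int := min (sentences.length : Int) (tags.length : Int)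
  let marks : List Int := (PySem.List.pyRange 0 n 1).filter
      (fun i => decide ("-DOCSTART-" ∈ PySem.List.pyGetD sentences i []))
  let bounds : List Int := -1 :: (marks ++ [n])
  let pairs := bounds.zip bounds.tail
  (pairs.map (fun lh => PySem.List.slice sentences (some (lh.1 + 1)) (some lh.2)),
   pairs.map (fun lh => PySem.List.slice tags (some (lh.1 + 1)) (some lh.2)))

-- ===== PRECONDITION & SPEC =====
def Spec_convert_to_document_py (sentences : List (List String)) (tags : List (List String)) (out : List (List (List String)) × List (List (List String))) : Prop := out = convert_to_document_py_alt sentences tags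
instance (sentences : List (List String)) (tags : List (List String)) (out : List (List (List String)) × List (List (List String))) : Decidable (Spec_convert_to_document_py sentences tags out) := by unfold Spec_convert_to_document_py; infer_instance

-- ===== CLAIM (what is proved, stated in full; the proofs are below) =====
def Claim_equal_convert_to_document_py : Prop := ∀ (sentences : List (List String)) (tags : List (List String)), Dom_convert_to_document_py sentences tags → Spec_convert_to_document_py sentences tags (convert_to_document_py sentences tags)

-- ===== LEMMAS AND PROOFS =====

-- marker predicate on a zipped (sentence, tag) pair
def pvQ (st : List String × List String) : Bool := decide ("-DOCSTART-" ∈ st.1)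

-- canonical segmentation: split the pair list at markers (markers removed)
def pvSegs {α : Type} (q : α → Bool) : List α → List (List α)
  | [] => [[]]
  | x :: rest =>
      if q x then [] :: pvSegs q rest
      else
        match pvSegs q rest with
        | [] => [[x]]
        | s :: ss => (x :: s) :: ss

-- marker positions (Nat level)
def pvMarksN {α : Type} (q : α → Bool) (xs : List α) : List Nat :=
  (List.range xs.length).filter (fun i => (xs[i]?.map q).getD false)

-- slice-based segmentation (Nat level): exactly B's bounds arithmetic
def pvSegsN {α : Type} (q : α → Bool) (xs : List α) : List (List α) :=
  List.zipWith (fun a b => (xs.drop a).take (b - a))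
    (0 :: (pvMarksN q xs).map (· + 1)) (pvMarksN q xs ++ [xs.length])

lemma pvSegs_cons {α : Type} (q : α → Bool) (xs : List α) :
    ∃ s ss, pvSegs q xs = s :: ss := by
  cases xs with
  | nil => exact ⟨[], [], rfl⟩
  | cons x rest =>
    simp only [pvSegs]
    split_ifs
    · exact ⟨_, _, rfl⟩
    · rcases h : pvSegs q rest with _ | ⟨s, ss⟩ <;> exact ⟨_, _, rfl⟩

lemma pvMarksN_cons {α : Type} (q : α → Bool) (x : α) (xs : List α) :
    pvMarksN q (x :: xs) = (if q x then [0] else []) ++ (pvMarksN q xs).map (· + 1) := by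
  unfold pvMarksN
  simp only [List.length_cons, List.range_succ_eq_map, List.filter_cons, List.filter_map,
    List.getElem?_cons_zero, List.getElem?_cons_succ, Option.map_some, Option.getD_some,
    Function.comp_def]
  cases hq : q x <;> simp_all

lemma pvShift {α : Type} (x : α) (xs : List α) (A B : List Nat) :
    List.zipWith (fun a b => ((x :: xs).drop a).take (b - a)) (A.map (· + 1)) (B.map (· + 1))
      = List.zipWith (fun a b => (xs.drop a).take (b - a)) A B := by
  induction A generalizing B with
  | nil => simp
  | cons a A ih =>
    cases B with
    | nil => simp
    | cons b B =>
      simp only [List.map_cons, List.zipWith_cons_cons, List.drop_succ_cons,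
        Nat.add_sub_add_right, ih]

lemma pvSegsN_cons_pos {α : Type} (q : α → Bool) (x : α) (rest : List α) (hq : q x = true) :
    pvSegsN q (x :: rest) = [] :: pvSegsN q rest := by
  have hm := pvMarksN_cons q x rest
  rw [hq] at hm
  simp only [if_pos, List.cons_append, List.nil_append] at hm
  unfold pvSegsN
  rw [hm, List.length_cons]
  have h1 : ((0 : Nat) :: (pvMarksN q rest).map (· + 1)).map (· + 1)
      = 1 :: ((pvMarksN q rest).map (· + 1)).map (· + 1) := by simp
  have h2 : ((pvMarksN q rest).map (· + 1) ++ [rest.length + 1])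
      = ((pvMarksN q rest) ++ [rest.length]).map (· + 1) := by simp
  simp only [List.map_cons, List.cons_append, List.zipWith_cons_cons, List.drop_zero,
    Nat.sub_zero, List.take_zero]
  rw [show ((1 : Nat) :: ((pvMarksN q rest).map (· + 1)).map (· + 1))
      = ((0 : Nat) :: (pvMarksN q rest).map (· + 1)).map (· + 1) from h1.symm, h2, pvShift]

lemma pvSegsN_cons_neg {α : Type} (q : α → Bool) (x : α) (rest : List α) (hq : q x = false) :
    pvSegsN q (x :: rest)
      = (x :: (pvSegsN q rest).headD []) :: (pvSegsN q rest).tail := by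
  have hm := pvMarksN_cons q x rest
  rw [hq] at hm
  simp only [Bool.false_eq_true, List.nil_append, reduceIte] at hm
  rcases hE : pvMarksN q rest ++ [rest.length] with _ | ⟨e, es⟩
  · exact absurd hE (by simp)
  unfold pvSegsN
  rw [hm, List.length_cons]
  have h2 : (pvMarksN q rest).map (· + 1) ++ [rest.length + 1]
      = (e + 1) :: es.map (· + 1) := by
    have : (pvMarksN q rest).map (· + 1) ++ [rest.length + 1]
        = ((pvMarksN q rest) ++ [rest.length]).map (· + 1) := by simp
    rw [this, hE]; simp
  rw [h2, hE]
  simp only [List.zipWith_cons_cons, List.drop_zero, Nat.sub_zero, List.headD_cons,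
    List.tail_cons]
  rw [pvShift]
  simp [List.take_succ_cons]

lemma pvSegsN_eq {α : Type} (q : α → Bool) (xs : List α) :
    pvSegsN q xs = pvSegs q xs := by
  induction xs with
  | nil => simp [pvSegsN, pvMarksN, pvSegs]
  | cons x rest ih =>
    obtain ⟨s, ss, hr⟩ := pvSegs_cons q rest
    cases hq : q x with
    | true =>
      rw [pvSegsN_cons_pos q x rest hq, ih]
      simp [pvSegs, hq]
    | false =>
      rw [pvSegsN_cons_neg q x rest hq, ih, hr]
      simp [pvSegs, hq, hr]

-- invariant of A's loop against the canonical segmentation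
lemma pvKeyA (pairs : List (List String × List String)) :
    ∀ D DT d dt s ss, pvSegs pvQ pairs = s :: ss →
      (((pairs.foldl pvStepA (D, DT, d, dt)).1 ++ [(pairs.foldl pvStepA (D, DT, d, dt)).2.2.1]),
       ((pairs.foldl pvStepA (D, DT, d, dt)).2.1 ++ [(pairs.foldl pvStepA (D, DT, d, dt)).2.2.2]))
      = (D ++ ((d ++ s.map Prod.fst) :: ss.map (List.map Prod.fst)),
         DT ++ ((dt ++ s.map Prod.snd) :: ss.map (List.map Prod.snd))) := by
  induction pairs with
  | nil =>
    intro D DT d dt s ss h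
    simp only [pvSegs] at h
    injection h with h1 h2
    subst h1; subst h2
    simp
  | cons st rest ih =>
    intro D DT d dt s ss h
    obtain ⟨s', ss', hr⟩ := pvSegs_cons pvQ rest
    by_cases hq : "-DOCSTART-" ∈ st.1
    · have hseg : pvSegs pvQ (st :: rest) = [] :: s' :: ss' := by
        simp only [pvSegs, pvQ, hq, decide_true, if_pos, hr]
      rw [hseg] at h
      injection h with h1 h2
      subst h1; subst h2
      simp only [List.foldl_cons, pvStepA, hq, if_pos]
      rw [ih (D ++ [d]) (DT ++ [dt]) [] [] s' ss' hr]
      simp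
    · have hseg : pvSegs pvQ (st :: rest) = (st :: s') :: ss' := by
        simp only [pvSegs, pvQ, hq, decide_false, Bool.false_eq_true, reduceIte, hr]
      rw [hseg] at h
      injection h with h1 h2
      subst h1; subst h2
      simp only [List.foldl_cons, pvStepA, hq, reduceIte]
      rw [ih D DT (d ++ [st.1]) (dt ++ [st.2]) s' ss' hr]
      simp

-- B's port computed at the Nat level over the zipped list
lemma pvZipCongr {α β γ : Type} (f g : α → β → γ) (P : β → Prop) (L1 : List α) (L2 : List β)
    (hP : ∀ b ∈ L2, P b) (hfg : ∀ a b, P b → f a b = g a b) :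
    List.zipWith f L1 L2 = List.zipWith g L1 L2 := by
  induction L1 generalizing L2 with
  | nil => simp
  | cons a A ih =>
    cases L2 with
    | nil => simp
    | cons b B =>
      have := hP b (by simp)
      simp only [List.zipWith_cons_cons, hfg a b this,
        ih B (fun x hx => hP x (by simp [hx]))]

lemma pvMapFstZip {α β : Type} (s : List α) (t : List β) :
    (s.zip t).map Prod.fst = s.take t.length := by
  induction s generalizing t with
  | nil => simp
  | cons a s ih => cases t <;> simp [ih]

lemma pvMapSndZip {α β : Type} (s : List α) (t : List β) :
    (s.zip t).map Prod.snd = t.take s.length := by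
  induction s generalizing t with
  | nil => simp
  | cons a s ih => cases t <;> simp [ih]

lemma pvTakeDropTake {α : Type} (s : List α) (m a b : Nat) (hb : b ≤ m) :
    (((s.take m).drop a).take (b - a)) = (s.drop a).take (b - a) := by
  rw [List.drop_take, List.take_take]
  congr 1
  omega

lemma pvMarksN_le {α : Type} (q : α → Bool) (xs : List α) :
    ∀ b ∈ pvMarksN q xs ++ [xs.length], b ≤ xs.length := by
  intro b hb
  rcases List.mem_append.mp hb with h | h
  · have := List.mem_range.mp (List.mem_of_mem_filter h)
    omega
  · simp at h; omega

lemma pvZipDropLast {α β : Type} (A : List α) (x : α) (B : List β) (h : B.length ≤ A.length) :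
    (A ++ [x]).zip B = A.zip B := by
  induction A generalizing B with
  | nil => cases B <;> simp_all
  | cons a A ih =>
    cases B with
    | nil => simp
    | cons b B => simp only [List.cons_append, List.zip_cons_cons,
        ih B (by simpa using h)]

lemma pvMapZip {α β γ : Type} (f : α × β → γ) (A : List α) (B : List β) :
    (A.zip B).map f = List.zipWith (fun a b => f (a, b)) A B := by
  induction A generalizing B with
  | nil => simp
  | cons a A ih =>
    cases B with
    | nil => simp
    | cons b B => simp [ih]

lemma pvAltEq (sentences tags : List (List String)) :
    convert_to_document_py_alt sentences tags
      = ((pvSegsN pvQ (sentences.zip tags)).map (List.map Prod.fst),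
         (pvSegsN pvQ (sentences.zip tags)).map (List.map Prod.snd)) := by
  set p := sentences.zip tags with hp
  have hpl : p.length = min sentences.length tags.length := by
    rw [hp]; exact List.length_zip
  have hn : min (sentences.length : Int) (tags.length : Int) = (p.length : Int) := by
    rw [hpl]; push_cast; rfl
  have hrange : PySem.List.pyRange 0 (p.length : Int) 1
      = (List.range p.length).map (fun k : Nat => (k : Int)) := by
    rw [PySem.List.pyRange_one]
    simp
  have hfilter : (List.range p.length).filter
      ((fun i => decide ("-DOCSTART-" ∈ PySem.List.pyGetD sentences i [])) ∘ (fun k : Nat => (k : Int)))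
      = pvMarksN pvQ p := by
    unfold pvMarksN
    apply List.filter_congr
    intro k hk
    have hk' := List.mem_range.mp hk
    have hks : k < sentences.length := by omega
    simp only [Function.comp_apply, PySem.List.pyGetD_natCast]
    rw [List.getD_eq_getElem sentences [] hks, List.getElem?_eq_getElem hk']
    simp only [Option.map_some, Option.getD_some, pvQ]
    simp only [hp, List.getElem_zip]
  have hL1 : ((-1 : Int) :: (pvMarksN pvQ p).map (fun k : Nat => (k : Int)))
      = ((0 : Nat) :: (pvMarksN pvQ p).map (· + 1)).map (fun a : Nat => (a : Int) - 1) := by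
    simp only [List.map_cons, List.map_map, Nat.cast_zero, zero_sub]
    congr 1
    apply List.map_congr_left
    intro m _
    simp only [Function.comp_apply]
    push_cast
    ring
  have hL2 : (pvMarksN pvQ p).map (fun k : Nat => (k : Int)) ++ [(p.length : Int)]
      = ((pvMarksN pvQ p) ++ [p.length]).map (fun k : Nat => (k : Int)) := by simp
  have hproj : ∀ (a b : Nat), b ≤ p.length →
      (((p.drop a).take (b - a)).map Prod.fst = (sentences.drop a).take (b - a)
       ∧ ((p.drop a).take (b - a)).map Prod.snd = (tags.drop a).take (b - a)) := by
    intro a b hb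
    constructor
    · rw [List.map_take, List.map_drop, hp, pvMapFstZip]
      exact pvTakeDropTake sentences tags.length a b (by omega)
    · rw [List.map_take, List.map_drop, hp, pvMapSndZip]
      exact pvTakeDropTake tags sentences.length a b (by omega)
  simp only [convert_to_document_py_alt]
  rw [hn, hrange, List.filter_map, hfilter]
  simp only [List.tail_cons]
  rw [show ((-1 : Int) :: ((pvMarksN pvQ p).map (fun k : Nat => (k : Int)) ++ [(p.length : Int)]))
      = ((-1 : Int) :: (pvMarksN pvQ p).map (fun k : Nat => (k : Int))) ++ [(p.length : Int)]
      from by simp]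
  rw [pvZipDropLast _ _ _ (by simp), pvMapZip, pvMapZip, hL1, hL2,
      List.zipWith_map, List.zipWith_map]
  unfold pvSegsN
  rw [List.map_zipWith, List.map_zipWith]
  congr 1
  · refine pvZipCongr _ _ (fun b => b ≤ p.length) _ _ (pvMarksN_le pvQ p) ?_
    intro a b hb
    show PySem.List.slice sentences (some ((a : Int) - 1 + 1)) (some (b : Int))
        = ((p.drop a).take (b - a)).map Prod.fst
    rw [show ((a : Int) - 1 + 1) = (a : Int) from by ring, PySem.List.slice_natCast]
    exact ((hproj a b hb).1).symm
  · refine pvZipCongr _ _ (fun b => b ≤ p.length) _ _ (pvMarksN_le pvQ p) ?_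
    intro a b hb
    show PySem.List.slice tags (some ((a : Int) - 1 + 1)) (some (b : Int))
        = ((p.drop a).take (b - a)).map Prod.snd
    rw [show ((a : Int) - 1 + 1) = (a : Int) from by ring, PySem.List.slice_natCast]
    exact ((hproj a b hb).2).symm

-- ===== VERDICT (by name: the statement is the Claim_ definition above) =====
theorem convert_to_document_py_spec : Claim_equal_convert_to_document_py := by
  intro sentences tags _
  unfold Spec_convert_to_document_py
  obtain ⟨s, ss, h⟩ := pvSegs_cons pvQ (sentences.zip tags)
  have hA := pvKeyA (sentences.zip tags) [] [] [] [] s ss h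
  rw [pvAltEq, pvSegsN_eq, h]
  unfold convert_to_document_py
  simpa using hA
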